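-- pv_equiv track=rewrite | github.com/crg253/free-movie-suggestion | tests/endtoend_test.py | sort_by_title_helper
-- ===== SOURCE A (Python) =====
-- def sort_by_title_helper(title):
--     # remove 'The' from title
--     if title[0:4] == "The ":
--         slug = title[4:]
--     else:
--         slug = title
--     to_remove = [" ", "'", ",", "!", ".", ":", "&", "-"]
--     for item in to_remove:
--         slug = slug.replace(item, "")
--     return slug.lower()
-- ===== SOURCE B (Python) =====
-- def sort_by_title_helper(title):
--     # remove 'The' from title
--     if title[0:4] == "The ":
--         slug = title[4:]
--     else:
--         slug = title
--     # single pass: drop every removable character, then lowercase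
--     return "".join(c for c in slug if c not in " ',!.:&-").lower()
-- ===== Notes on version B (the rewrite author's own statement) =====
-- stated objective: simpler
-- what changed: Replaces the loop of eight sequential full-string str.replace passes by one character-level pass that filters out the removal set with a joined generator expression.
import Mathlib
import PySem

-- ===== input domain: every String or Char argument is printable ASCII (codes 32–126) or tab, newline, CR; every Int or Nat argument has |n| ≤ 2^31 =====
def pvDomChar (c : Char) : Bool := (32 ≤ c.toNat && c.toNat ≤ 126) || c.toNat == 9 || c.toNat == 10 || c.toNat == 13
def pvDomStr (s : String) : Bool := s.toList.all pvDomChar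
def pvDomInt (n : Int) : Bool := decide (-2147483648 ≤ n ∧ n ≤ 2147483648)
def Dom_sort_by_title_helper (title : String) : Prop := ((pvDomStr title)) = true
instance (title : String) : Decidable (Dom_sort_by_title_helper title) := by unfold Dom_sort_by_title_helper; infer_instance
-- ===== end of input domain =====

-- ===== PORT A =====
def sort_by_title_helper (title : String) : String :=
  let slug := if PySem.Str.slice title (some 0) (some 4) = "The "
              then PySem.Str.slice title (some 4) none else title
  let to_remove : List String := [" ", "'", ",", "!", ".", ":", "&", "-"]
  let slug := to_remove.foldl (fun s item => PySem.Str.replace s item "") slug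
  PySem.Str.lower slug

-- ===== PORT B =====
-- one line: B filters the removal characters in a single pass and lowercases
def sort_by_title_helper_alt (title : String) : String :=
  let slug := if PySem.Str.slice title (some 0) (some 4) = "The "
              then PySem.Str.slice title (some 4) none else title
  (PySem.Str.lower (String.ofList
    (slug.toList.filter (fun c => !(" \',!.:&-".toList.contains c)))))

-- ===== PRECONDITION & SPEC =====
def Spec_sort_by_title_helper (title : String) (out : String) : Prop := out = sort_by_title_helper_alt title
instance (title : String) (out : String) : Decidable (Spec_sort_by_title_helper title out) := by unfold Spec_sort_by_title_helper; infer_instance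

-- ===== CLAIM (what is proved, stated in full; the proofs are below) =====
def Claim_equal_sort_by_title_helper : Prop := ∀ (title : String), Dom_sort_by_title_helper title → Spec_sort_by_title_helper title (sort_by_title_helper title)

-- ===== LEMMAS AND PROOFS =====

-- replacing a single character by the empty string is a filter
theorem replace_go_single (c : Char) (l acc : List Char) (fuel : Nat)
    (h : l.length ≤ fuel) :
    PySem.Chars.replace.go [c] [] fuel l acc = acc.reverse ++ l.filter (· ≠ c) := by
  induction l generalizing acc fuel with
  | nil => cases fuel <;> simp [PySem.Chars.replace.go]
  | cons d t ih =>
    cases fuel with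
    | zero => simp at h
    | succ n =>
      simp only [PySem.Chars.replace.go]
      by_cases hdc : d = c
      · subst hdc
        have hp : List.isPrefixOf [d] (d :: t) = true := by simp [List.isPrefixOf]
        simp only [hp, if_true, List.length_nil, List.length_cons, List.reverse_nil,
          List.nil_append, List.drop_succ_cons, List.drop_zero]
        rw [ih acc n (by simp at h; omega)]
        simp
      · have hp : List.isPrefixOf [c] (d :: t) = false := by
          simp [List.isPrefixOf]; exact fun h => absurd h.symm hdc
        simp only [hp, Bool.false_eq_true, if_false]
        rw [ih (d :: acc) n (by simp at h; omega)]
        simp [hdc]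

theorem replace_single (c : Char) (l : List Char) :
    PySem.Chars.replace l [c] [] = l.filter (· ≠ c) := by
  simp only [PySem.Chars.replace, List.isEmpty_cons, Bool.false_eq_true, if_false]
  simpa using replace_go_single c l [] l.length le_rfl

theorem str_replace_single (r : String) (c : Char) (hr : r.toList = [c]) (s : String) :
    (PySem.Str.replace s r "").toList = s.toList.filter (· ≠ c) := by
  rw [PySem.Str.toList_replace, hr]
  have h0 : ("" : String).toList = [] := rfl
  rw [h0, replace_single]

-- the eight single-character replace passes amount to one filter over the removal set
theorem foldl_replace_eq_filter (slug : String) :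
    ([" ", "'", ",", "!", ".", ":", "&", "-"].foldl
        (fun s item => PySem.Str.replace s item "") slug).toList
    = slug.toList.filter (fun c => !(" ',!.:&-".toList.contains c)) := by
  simp only [List.foldl]
  rw [str_replace_single "-" '-' rfl, str_replace_single "&" '&' rfl,
      str_replace_single ":" ':' rfl, str_replace_single "." '.' rfl,
      str_replace_single "!" '!' rfl, str_replace_single "," ',' rfl,
      str_replace_single "'" '\'' rfl, str_replace_single " " ' ' rfl]
  simp only [List.filter_filter]
  have hrm : (" ',!.:&-" : String).toList = [' ', '\'', ',', '!', '.', ':', '&', '-'] := rfl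
  rw [hrm]
  congr 1
  funext c
  simp [ne_eq, decide_not]
  ac_rfl

theorem sort_by_title_helper_eq_alt (title : String) :
    sort_by_title_helper title = sort_by_title_helper_alt title := by
  unfold sort_by_title_helper sort_by_title_helper_alt
  rw [← String.toList_inj]
  simp only [PySem.Str.lower, String.toList_ofList]
  rw [String.toList_ofList, foldl_replace_eq_filter]
  rfl

-- ===== VERDICT (by name: the statement is the Claim_ definition above) =====
theorem sort_by_title_helper_spec : Claim_equal_sort_by_title_helper :=
  fun title _ => sort_by_title_helper_eq_alt title
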